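-- pv_equiv track=rewrite | github.com/giellalt/giella-core | scripts/missing.py | get_matching_lexc_stems
-- ===== SOURCE A (Python) =====
-- def get_matching_lexc_stems(
--     hfst_stem: str, lexc_stems: list[str]
-- ) -> tuple[str, list[str]]:
--     """Get the matching lexc stems for a HFST stem.
--
--     Args:
--         hfst_stem: The HFST stem.
--         lexc_stems: The lexc stems, keys from the lexc dictionary.
--
--     Returns:
--         A tuple with the common ending and a list of the matching lexc stems.
--     """
--     for index in range(1, len(hfst_stem) - 3):
--         ending = hfst_stem[index:]
--         hits = [stem for stem in lexc_stems if stem.endswith(ending)]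
--         if hits:
--             return ending, hits
--
--     return "", []
-- ===== SOURCE B (Python) =====
-- def _common_suffix_len(stem: str, hfst_stem: str) -> int:
--     k = 0
--     while k < len(stem) and k < len(hfst_stem) and stem[len(stem) - 1 - k] == hfst_stem[len(hfst_stem) - 1 - k]:
--         k += 1
--     return k
--
--
-- def get_matching_lexc_stems(
--     hfst_stem: str, lexc_stems: list[str]
-- ) -> tuple[str, list[str]]:
--     """Single pass per stem: the longest common suffix of a stem with
--     hfst_stem tells the smallest slice index at which it matches."""
--     n = len(hfst_stem)
--     best = None
--     for stem in lexc_stems: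
--         k = _common_suffix_len(stem, hfst_stem)
--         idx = max(1, n - k)
--         if idx <= n - 4 and (best is None or idx < best):
--             best = idx
--     if best is None:
--         return "", []
--     return hfst_stem[best:], [
--         stem
--         for stem in lexc_stems
--         if _common_suffix_len(stem, hfst_stem) >= n - best
--     ]
-- ===== Notes on version B (the rewrite author's own statement) =====
-- stated objective: faster
-- what changed: Instead of scanning every suffix of hfst_stem and re-testing all stems against each (O(N*L^2)), B computes for each stem once its longest common suffix length with hfst_stem, derives the minimal matching slice index per stem, takes the overall minimum, and filters the stems by that single index.
import Mathlib
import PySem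

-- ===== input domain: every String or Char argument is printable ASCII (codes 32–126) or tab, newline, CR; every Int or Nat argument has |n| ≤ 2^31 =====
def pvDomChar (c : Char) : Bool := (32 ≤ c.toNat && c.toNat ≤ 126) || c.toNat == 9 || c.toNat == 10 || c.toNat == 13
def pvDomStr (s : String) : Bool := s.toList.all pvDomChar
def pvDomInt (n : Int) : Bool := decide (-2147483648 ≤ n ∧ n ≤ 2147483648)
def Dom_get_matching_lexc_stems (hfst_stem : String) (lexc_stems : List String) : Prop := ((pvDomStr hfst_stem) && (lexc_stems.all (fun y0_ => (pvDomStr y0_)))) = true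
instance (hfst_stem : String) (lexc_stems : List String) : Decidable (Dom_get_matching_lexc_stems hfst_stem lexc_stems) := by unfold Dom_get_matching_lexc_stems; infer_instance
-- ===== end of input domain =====

-- B replaces A's scan over every suffix (each re-testing all stems) by one
-- longest-common-suffix computation per stem; asymptotically faster.

-- ===== PORT A =====
-- the 'for index in range(1, len(hfst_stem)-3)' loop with early return
def pvALoop (h : List Char) (stems : List String) : List Int → String × List String
  | [] => ("", [])
  | i :: rest =>
    let ending := PySem.List.slice h (some i) none          -- hfst_stem[index:]
    let hits := stems.filter (fun st => PySem.Chars.endswith st.toList ending)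
    if hits.isEmpty then pvALoop h stems rest else (String.ofList ending, hits)

def get_matching_lexc_stems (hfst_stem : String) (lexc_stems : List String) : String × List String :=
  pvALoop hfst_stem.toList lexc_stems
    (PySem.List.pyRange 1 ((hfst_stem.toList.length : Int) - 3) 1)

-- ===== PORT B =====
-- length of the longest common suffix of two char lists (hand loop in Source B;
-- ported as common-prefix length of the reverses — exact on all inputs)
def pvLcp : List Char → List Char → Nat
  | a :: as, b :: bs => if a = b then pvLcp as bs + 1 else 0
  | _, _ => 0

def pvCommonSuffixLen (stem h : List Char) : Nat := pvLcp stem.reverse h.reverse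

-- one step of B's 'best' loop: idx = max(1, n-k); keep it if idx <= n-4 and smaller
def pvBStep (n : Nat) (acc : Option Nat) (k : Nat) : Option Nat :=
  let idx := max 1 (n - k)
  match acc with
  | none => if idx ≤ n - 4 then some idx else none
  | some b => if idx ≤ n - 4 ∧ idx < b then some idx else some b

-- B's first loop over the stems
def pvBest (h : List Char) (stems : List String) : Option Nat :=
  stems.foldl (fun acc st => pvBStep h.length acc (pvCommonSuffixLen st.toList h)) none

def get_matching_lexc_stems_alt (hfst_stem : String) (lexc_stems : List String) : String × List String :=
  match pvBest hfst_stem.toList lexc_stems with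
  | none => ("", [])
  | some b =>
    (String.ofList (hfst_stem.toList.drop b),
     lexc_stems.filter (fun st =>
       hfst_stem.toList.length - b ≤ pvCommonSuffixLen st.toList hfst_stem.toList))

-- ===== PRECONDITION & SPEC =====
def Spec_get_matching_lexc_stems (hfst_stem : String) (lexc_stems : List String) (out : String × List String) : Prop := out = get_matching_lexc_stems_alt hfst_stem lexc_stems
instance (hfst_stem : String) (lexc_stems : List String) (out : String × List String) : Decidable (Spec_get_matching_lexc_stems hfst_stem lexc_stems out) := by unfold Spec_get_matching_lexc_stems; infer_instance

-- ===== CLAIM (what is proved, stated in full; the proofs are below) =====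
def Claim_equal_get_matching_lexc_stems : Prop := ∀ (hfst_stem : String) (lexc_stems : List String), Dom_get_matching_lexc_stems hfst_stem lexc_stems → Spec_get_matching_lexc_stems hfst_stem lexc_stems (get_matching_lexc_stems hfst_stem lexc_stems)

-- ===== LEMMAS AND PROOFS =====

-- take m of b is a prefix of a  ↔  the first m characters agree
theorem pv_take_prefix_iff_lcp (a b : List Char) (m : Nat) (hm : m ≤ b.length) :
    (b.take m <+: a) ↔ m ≤ pvLcp a b := by
  induction m generalizing a b with
  | zero => simp
  | succ m ih =>
    cases b with
    | nil => simp at hm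
    | cons c bs =>
      cases a with
      | nil =>
        simp only [List.take_succ_cons]
        constructor
        · intro hcon; simpa using hcon.length_le
        · intro hcon; simp [pvLcp] at hcon
      | cons d as =>
        simp only [List.take_succ_cons, pvLcp, List.cons_prefix_cons]
        by_cases hdc : d = c
        · subst hdc
          rw [if_pos rfl, ih as bs (by simpa using hm)]
          constructor
          · rintro ⟨-, h2⟩; omega
          · intro hx; exact ⟨rfl, by omega⟩
        · rw [if_neg hdc]
          constructor
          · rintro ⟨h1, -⟩; exact absurd h1.symm hdc
          · omega

-- stem ends with h[i:]  ↔  the common suffix length is at least n - i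
theorem pv_endswith_iff_lcs (h st : List Char) (i : Nat) (_hi : i ≤ h.length) :
    (PySem.Chars.endswith st (h.drop i) = true) ↔ h.length - i ≤ pvCommonSuffixLen st h := by
  rw [PySem.Chars.endswith_iff]
  have h1 : (h.drop i <:+ st) ↔ ((h.drop i).reverse <+: st.reverse) := (List.reverse_prefix).symm
  rw [h1, List.reverse_drop, pvCommonSuffixLen]
  exact pv_take_prefix_iff_lcp st.reverse h.reverse (h.length - i) (by simp)

-- A's per-index hit test, as an existential
theorem pv_hits_ne_empty (h : List Char) (stems : List String) (i : Nat) (hi : i ≤ h.length) :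
    ((stems.filter (fun st => PySem.Chars.endswith st.toList (h.drop i))).isEmpty = false) ↔
      ∃ st ∈ stems, h.length - pvCommonSuffixLen st.toList h ≤ i := by
  rw [List.isEmpty_eq_false_iff_exists_mem]
  constructor
  · rintro ⟨st, hmem⟩
    rw [List.mem_filter] at hmem
    refine ⟨st, hmem.1, ?_⟩
    have := (pv_endswith_iff_lcs h st.toList i hi).mp hmem.2
    omega
  · rintro ⟨st, hmem, hk⟩
    exact ⟨st, List.mem_filter.mpr ⟨hmem, (pv_endswith_iff_lcs h st.toList i hi).mpr (by omega)⟩⟩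

-- the per-stem minimal matching index of B
def pvG (h : List Char) (st : String) : Nat := max 1 (h.length - pvCommonSuffixLen st.toList h)

-- characterisation of B's foldl over pvBStep
theorem pv_fold_spec (h : List Char) (stems : List String) (acc : Option Nat)
    (haccN : ∀ b, acc = some b → 1 ≤ b ∧ b ≤ h.length - 4) :
    (stems.foldl (fun a st => pvBStep h.length a (pvCommonSuffixLen st.toList h)) acc = none →
        acc = none ∧ ∀ st ∈ stems, ¬ pvG h st ≤ h.length - 4) ∧
    (∀ b, stems.foldl (fun a st => pvBStep h.length a (pvCommonSuffixLen st.toList h)) acc = some b →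
      (1 ≤ b ∧ b ≤ h.length - 4) ∧
      (acc = some b ∨ ∃ st ∈ stems, pvG h st ≤ h.length - 4 ∧ pvG h st = b) ∧
      (∀ b0, acc = some b0 → b ≤ b0) ∧
      (∀ st ∈ stems, pvG h st ≤ h.length - 4 → b ≤ pvG h st)) := by
  induction stems generalizing acc with
  | nil =>
    simp only [List.foldl_nil]
    refine ⟨fun hr => ⟨hr, by simp⟩, fun b hb => ⟨haccN b hb, Or.inl hb, ?_, by simp⟩⟩
    intro b0 h0; rw [hb] at h0; cases h0; omega
  | cons st rest ih =>
    simp only [List.foldl_cons]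
    -- properties of the single step
    have key : (pvBStep h.length acc (pvCommonSuffixLen st.toList h) = none →
          acc = none ∧ ¬ pvG h st ≤ h.length - 4) ∧
        (∀ c, pvBStep h.length acc (pvCommonSuffixLen st.toList h) = some c →
          (1 ≤ c ∧ c ≤ h.length - 4) ∧
          (acc = some c ∨ (pvG h st ≤ h.length - 4 ∧ pvG h st = c)) ∧
          (∀ b0, acc = some b0 → c ≤ b0) ∧
          (pvG h st ≤ h.length - 4 → c ≤ pvG h st)) := by
      cases acc with
      | none =>
        have hstep : pvBStep h.length none (pvCommonSuffixLen st.toList h) =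
            if pvG h st ≤ h.length - 4 then some (pvG h st) else none := rfl
        rw [hstep]
        by_cases h4 : pvG h st ≤ h.length - 4
        · rw [if_pos h4]
          constructor
          · intro hc; exact absurd hc (by simp)
          intro c hc
          cases hc
          exact ⟨⟨le_max_left _ _, h4⟩, Or.inr ⟨h4, rfl⟩, fun b0 h0 => absurd h0 (by simp), fun _ => le_rfl⟩
        · rw [if_neg h4]
          exact ⟨fun _ => ⟨rfl, h4⟩, fun c hc => nomatch hc⟩
      | some b0 =>
        have hb0 := haccN b0 rfl
        have hstep : pvBStep h.length (some b0) (pvCommonSuffixLen st.toList h) =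
            if pvG h st ≤ h.length - 4 ∧ pvG h st < b0 then some (pvG h st) else some b0 := rfl
        rw [hstep]
        by_cases hcase : pvG h st ≤ h.length - 4 ∧ pvG h st < b0
        · rw [if_pos hcase]
          constructor
          · intro hc; exact absurd hc (by simp)
          intro c hc
          cases hc
          refine ⟨⟨le_max_left _ _, hcase.1⟩, Or.inr ⟨hcase.1, rfl⟩, ?_, fun _ => le_rfl⟩
          intro b1 h1; cases h1; omega
        · rw [if_neg hcase]
          constructor
          · intro hc; exact absurd hc (by simp)
          intro c hc
          cases hc
          refine ⟨hb0, Or.inl rfl, fun b1 h1 => by cases h1; omega, fun h4 => by omega⟩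
    have hacc' : ∀ b, pvBStep h.length acc (pvCommonSuffixLen st.toList h) = some b →
        1 ≤ b ∧ b ≤ h.length - 4 := fun b hb => (key.2 b hb).1
    have IH := ih (pvBStep h.length acc (pvCommonSuffixLen st.toList h)) hacc'
    refine ⟨?_, ?_⟩
    · intro hnone
      have ⟨h1, h2⟩ := IH.1 hnone
      have ⟨ha, hst⟩ := key.1 h1
      refine ⟨ha, ?_⟩
      intro s hs
      rcases List.mem_cons.mp hs with hs' | hs'
      · subst hs'; exact hst
      · exact h2 s hs'
    · intro b hb
      have ⟨hN, hwit, hle0, hmin⟩ := IH.2 b hb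
      refine ⟨hN, ?_, ?_, ?_⟩
      · rcases hwit with hw | ⟨s, hs, h4, hgs⟩
        · rcases (key.2 b hw).2.1 with hx | ⟨h4, hg⟩
          · exact Or.inl hx
          · exact Or.inr ⟨st, List.mem_cons_self, h4, hg⟩
        · exact Or.inr ⟨s, List.mem_cons_of_mem _ hs, h4, hgs⟩
      · intro b0 h0
        cases hA : pvBStep h.length acc (pvCommonSuffixLen st.toList h) with
        | none => exact absurd h0 (by rw [(key.1 hA).1]; simp)
        | some c => exact le_trans (hle0 c hA) ((key.2 c hA).2.2.1 b0 h0)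
      · intro s hs h4
        rcases List.mem_cons.mp hs with hsh | hsh
        · cases hA : pvBStep h.length acc (pvCommonSuffixLen st.toList h) with
          | none => exact absurd (hsh ▸ h4) (key.1 hA).2
          | some c =>
            rw [hsh]
            exact le_trans (hle0 c hA) ((key.2 c hA).2.2.2 (hsh ▸ h4))
        · exact hmin s hsh h4

-- A's loop returns ("",[]) when no index in the remaining range hits
theorem pv_loop_none (h : List Char) (stems : List String) (a b : Int)
    (hno : ∀ i : Int, a ≤ i → i < b → (stems.filter (fun st => PySem.Chars.endswith st.toList (PySem.List.slice h (some i) none))).isEmpty = true) :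
    pvALoop h stems (PySem.List.pyRange a b 1) = ("", []) := by
  by_cases hab : b ≤ a
  · rw [PySem.List.pyRange_one_eq_nil hab]; rfl
  · rw [PySem.List.pyRange_one_cons (by omega)]
    show (if _ then _ else _) = _
    rw [if_pos (hno a le_rfl (by omega))]
    exact pv_loop_none h stems (a + 1) b (fun i h1 h2 => hno i (by omega) h2)
termination_by (b - a).toNat
decreasing_by omega

-- A's loop returns the result at the first hitting index
theorem pv_loop_found (h : List Char) (stems : List String) (a b : Int) (i0 : Int)
    (ha : a ≤ i0) (hb : i0 < b)
    (hhit : (stems.filter (fun st => PySem.Chars.endswith st.toList (PySem.List.slice h (some i0) none))).isEmpty = false)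
    (hfirst : ∀ j : Int, a ≤ j → j < i0 → (stems.filter (fun st => PySem.Chars.endswith st.toList (PySem.List.slice h (some j) none))).isEmpty = true) :
    pvALoop h stems (PySem.List.pyRange a b 1) =
      (String.ofList (PySem.List.slice h (some i0) none),
       stems.filter (fun st => PySem.Chars.endswith st.toList (PySem.List.slice h (some i0) none))) := by
  rw [PySem.List.pyRange_one_cons (by omega)]
  show (if _ then _ else _) = _
  by_cases hai : a = i0
  · subst hai
    rw [if_neg (by rw [hhit]; simp)]
  · rw [if_pos (hfirst a le_rfl (by omega))]
    exact pv_loop_found h stems (a + 1) b i0 (by omega) hb hhit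
      (fun j h1 h2 => hfirst j (by omega) h2)
termination_by (b - a).toNat
decreasing_by omega

-- ===== VERDICT (by name: the statement is the Claim_ definition above) =====
theorem get_matching_lexc_stems_spec : Claim_equal_get_matching_lexc_stems := by
  intro hfst_stem lexc_stems _
  show get_matching_lexc_stems hfst_stem lexc_stems = get_matching_lexc_stems_alt hfst_stem lexc_stems
  unfold get_matching_lexc_stems get_matching_lexc_stems_alt
  set h := hfst_stem.toList with hh
  set n := h.length with hn
  have hspec := pv_fold_spec h lexc_stems none (by simp)
  have hslice : ∀ i : Int, 0 ≤ i → PySem.List.slice h (some i) none = h.drop i.toNat :=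
    fun i hi => PySem.List.slice_from h hi
  cases hB : pvBest h lexc_stems with
  | none =>
    unfold pvBest at hB
    have ⟨_, hnone⟩ := hspec.1 hB
    show pvALoop h lexc_stems (PySem.List.pyRange 1 ((n : Int) - 3) 1) = ("", [])
    apply pv_loop_none
    intro i h1 h2
    have hin : i.toNat ≤ n := by omega
    rw [hslice i (by omega)]
    by_contra hne
    have hne' : (lexc_stems.filter (fun st => PySem.Chars.endswith st.toList (h.drop i.toNat))).isEmpty = false := by
      cases hq : (lexc_stems.filter (fun st => PySem.Chars.endswith st.toList (h.drop i.toNat))).isEmpty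
      · rfl
      · exact absurd hq hne
    obtain ⟨st, hmem, hk⟩ := (pv_hits_ne_empty h lexc_stems i.toNat hin).mp hne'
    exact hnone st hmem (by unfold pvG; omega)
  | some b0 =>
    unfold pvBest at hB
    show pvALoop h lexc_stems (PySem.List.pyRange 1 ((n : Int) - 3) 1) =
      (String.ofList (h.drop b0),
       lexc_stems.filter (fun st => decide (n - b0 ≤ pvCommonSuffixLen st.toList h)))
    have ⟨⟨hb1, hb4⟩, hwit, _, hmin⟩ := hspec.2 b0 hB
    have hn5 : 5 ≤ n := by omega
    rcases hwit with hw | ⟨st0, hst0, h40, hg0⟩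
    · cases hw
    have hhit : (lexc_stems.filter (fun st => PySem.Chars.endswith st.toList (PySem.List.slice h (some (b0 : Int)) none))).isEmpty = false := by
      rw [hslice (b0 : Int) (by omega)]
      simp only [Int.toNat_natCast]
      apply ((pv_hits_ne_empty h lexc_stems b0 (by omega)).mpr)
      exact ⟨st0, hst0, by unfold pvG at hg0; omega⟩
    have hfirst : ∀ j : Int, 1 ≤ j → j < (b0 : Int) → (lexc_stems.filter (fun st => PySem.Chars.endswith st.toList (PySem.List.slice h (some j) none))).isEmpty = true := by
      intro j h1 h2
      rw [hslice j (by omega)]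
      by_contra hne
      have hne' : (lexc_stems.filter (fun st => PySem.Chars.endswith st.toList (h.drop j.toNat))).isEmpty = false := by
        cases hq : (lexc_stems.filter (fun st => PySem.Chars.endswith st.toList (h.drop j.toNat))).isEmpty
        · rfl
        · exact absurd hq hne
      obtain ⟨st, hmem, hk⟩ := (pv_hits_ne_empty h lexc_stems j.toNat (by omega)).mp hne'
      have hgle : pvG h st ≤ n - 4 := by unfold pvG; omega
      have := hmin st hmem hgle
      unfold pvG at this
      omega
    have hloop := pv_loop_found h lexc_stems 1 ((n : Int) - 3) (b0 : Int) (by omega) (by omega) hhit hfirst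
    rw [hloop, hslice (b0 : Int) (by omega)]
    simp only [Int.toNat_natCast]
    congr 1
    apply List.filter_congr
    intro st hmem
    have hiff := pv_endswith_iff_lcs h st.toList b0 (by omega)
    cases hE : PySem.Chars.endswith st.toList (h.drop b0) with
    | true =>
      have := hiff.mp hE
      symm
      exact decide_eq_true (by omega)
    | false =>
      symm
      rw [decide_eq_false_iff_not]
      intro hx
      have := hiff.mpr hx
      rw [hE] at this
      exact Bool.false_ne_true this
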